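-- pv_equiv track=rewrite | github.com/wcgbg/matrix-multiplication-lower-bound-n3r20f2 | orbit_count_lower_bound.py | gl_order
-- ===== SOURCE A (Python) =====
-- def gl_order(n: int, p: int) -> int:
--     """Order of GL(n, F_p) for prime p; GL(0) is trivial of order 1."""
--     if n < 0:
--         raise ValueError("n must be nonnegative")
--     if p < 2:
--         raise ValueError("p must be >= 2")
--     r = 1
--     for k in range(n):
--         r *= p**n - p**k
--     return r
-- ===== SOURCE B (Python) =====
-- def gl_order(n: int, p: int) -> int:
--     """Order of GL(n, F_p) for prime p; GL(0) is trivial of order 1."""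
--     if n < 0:
--         raise ValueError("n must be nonnegative")
--     if p < 2:
--         raise ValueError("p must be >= 2")
--
--     def go(m: int) -> int:
--         # |GL(m)| = (p^m - 1) * p^(m-1) * |GL(m-1)|, counting an invertible
--         # matrix by its first row (p^m - 1 nonzero choices up to the cokernel
--         # factor p^(m-1)) times a smaller invertible block.
--         if m == 0:
--             return 1
--         return (p**m - 1) * p ** (m - 1) * go(m - 1)
--
--     return go(n)
-- ===== Notes on version B (the rewrite author's own statement) =====
-- stated objective: alternative
-- what changed: B replaces A's ascending loop over k multiplying (p^n - p^k) by a recursion on n using the group-order recurrence |GL(n)| = (p^n - 1) * p^(n-1) * |GL(n-1)|, so no term ever involves both n and a loop index.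
import Mathlib
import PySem

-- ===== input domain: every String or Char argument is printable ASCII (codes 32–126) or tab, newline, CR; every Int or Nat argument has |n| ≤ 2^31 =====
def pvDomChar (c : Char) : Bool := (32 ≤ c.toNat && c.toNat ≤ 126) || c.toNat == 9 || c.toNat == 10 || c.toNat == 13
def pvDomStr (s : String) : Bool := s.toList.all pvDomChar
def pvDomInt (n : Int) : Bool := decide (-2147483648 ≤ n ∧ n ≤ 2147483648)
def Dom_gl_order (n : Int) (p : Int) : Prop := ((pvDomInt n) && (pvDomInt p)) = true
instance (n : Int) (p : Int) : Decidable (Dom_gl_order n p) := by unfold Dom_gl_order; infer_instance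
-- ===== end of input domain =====

-- B replaces A's loop over k of (p^n - p^k) by recursion on n via |GL(n)| = (p^n - 1)*p^(n-1)*|GL(n-1)| (alternative decomposition; return-value equivalence).


-- ===== PORT A =====
-- Python raises ValueError when n < 0 or p < 2; the port returns 0 there and Pre_ excludes those inputs.
def gl_order (n : Int) (p : Int) : Int :=
  if n < 0 then 0
  else if p < 2 then 0
  else (PySem.List.pyRange 0 n 1).foldl (fun r k => r * (p ^ n.toNat - p ^ k.toNat)) 1

-- ===== PORT B =====
-- recursive helper go from Source B, on the Nat value of n
def glGo (p : Int) : Nat → Int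
  | 0 => 1
  | m + 1 => (p ^ (m + 1) - 1) * p ^ m * glGo p m

def gl_order_alt (n : Int) (p : Int) : Int :=
  if n < 0 then 0
  else if p < 2 then 0
  else glGo p n.toNat

-- ===== PRECONDITION & SPEC =====
-- A raises ValueError exactly when n < 0 or p < 2; those inputs are excluded.
def Pre_gl_order (n : Int) (p : Int) : Prop := 0 ≤ n ∧ 2 ≤ p
instance (n : Int) (p : Int) : Decidable (Pre_gl_order n p) := by unfold Pre_gl_order; infer_instance
def pvWitness_gl_order : Int × Int := (3, 2)
def Spec_gl_order (n : Int) (p : Int) (out : Int) : Prop := out = gl_order_alt n p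
instance (n : Int) (p : Int) (out : Int) : Decidable (Spec_gl_order n p out) := by unfold Spec_gl_order; infer_instance

-- ===== CLAIM (what is proved, stated in full; the proofs are below) =====
def Claim_equal_gl_order : Prop := ∀ (n : Int) (p : Int), Dom_gl_order n p → Pre_gl_order n p → Spec_gl_order n p (gl_order n p)

-- ===== LEMMAS AND PROOFS =====

theorem pv_foldl_mul_range (f : Int → Int) (n : ℕ) (a : Int) :
    ((List.range n).map (fun (k : Nat) => (k : Int))).foldl (fun r k => r * f k) a
      = a * ∏ k ∈ Finset.range n, f (k : Int) := by
  induction n generalizing a with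
  | zero => simp
  | succ m ih =>
      rw [List.range_succ, Finset.prod_range_succ]
      simp only [List.map_append, List.foldl_append, List.map_cons, List.map_nil,
        List.foldl_cons, List.foldl_nil, ih]
      ring

theorem pv_pyRange_zero_map (n : ℕ) :
    PySem.List.pyRange 0 (n : Int) 1 = (List.range n).map (fun (k : Nat) => (k : Int)) := by
  rw [PySem.List.pyRange_one]
  have h : ((n : Int) - 0).toNat = n := by omega
  rw [h]
  apply List.map_congr_left
  intro k _
  omega

-- the core identity: A's product satisfies B's recurrence
theorem pv_prod_eq_go (p : Int) (n : ℕ) :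
    (∏ k ∈ Finset.range n, (p ^ n - p ^ k)) = glGo p n := by
  induction n with
  | zero => simp [glGo]
  | succ m ih =>
      rw [Finset.prod_range_succ']
      have h1 : ∀ k ∈ Finset.range m, p ^ (m + 1) - p ^ (k + 1) = p * (p ^ m - p ^ k) := by
        intro k _
        rw [mul_sub, ← pow_succ', ← pow_succ']
      rw [Finset.prod_congr rfl h1, Finset.prod_mul_distrib, Finset.prod_const,
        Finset.card_range, ih, glGo]
      ring

-- ===== VERDICT (by name: the statement is the Claim_ definition above) =====
theorem gl_order_spec : Claim_equal_gl_order := by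
  intro n p _ hpre
  obtain ⟨hn, hp⟩ := hpre
  unfold Spec_gl_order gl_order gl_order_alt
  rw [if_neg (by omega), if_neg (by omega), if_neg (by omega), if_neg (by omega)]
  obtain ⟨m, rfl⟩ := Int.eq_ofNat_of_zero_le hn
  rw [pv_pyRange_zero_map, pv_foldl_mul_range, one_mul]
  have hcast : ∀ k ∈ Finset.range m, (p ^ ((m : Int)).toNat - p ^ (k : Int).toNat)
      = (p ^ m - p ^ k) := by intro k _; simp
  rw [Finset.prod_congr rfl hcast, pv_prod_eq_go, Int.toNat_natCast]
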